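-- pv_equiv track=rewrite | github.com/aweidner/aoc24 | 9/day9.py | chunks_of_data
-- ===== SOURCE A (Python) =====
-- def chunks_of_data(data):
--     index = len(data) - 1
--     while index >= 0:
--         if data[index] != -1:
--             end = index
--             start = index
--             while end >= 0 and start >= 0 and data[end] == data[start]:
--                 start -= 1
--             yield (start + 1, end)
--             index = start
--         else:
--             index -= 1
-- ===== SOURCE B (Python) =====
-- # B: one left-to-right pass collecting the inclusive bounds of each maximal run
-- # of equal values via itertools.groupby, then yields the non -1 runs reversed.
-- from itertools import groupby
--
--
-- def chunks_of_data(data):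
--     runs = []
--     i = 0
--     for value, group in groupby(data):
--         length = sum(1 for _ in group)
--         if value != -1:
--             runs.append((i, i + length - 1))
--         i += length
--     yield from reversed(runs)
-- ===== Notes on version B (the rewrite author's own statement) =====
-- stated objective: idiomatic
-- what changed: A walks right-to-left with a nested rescan that re-finds each run's start; B makes one left-to-right grouping pass (itertools.groupby) collecting run bounds eagerly, then yields them reversed.
import Mathlib
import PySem

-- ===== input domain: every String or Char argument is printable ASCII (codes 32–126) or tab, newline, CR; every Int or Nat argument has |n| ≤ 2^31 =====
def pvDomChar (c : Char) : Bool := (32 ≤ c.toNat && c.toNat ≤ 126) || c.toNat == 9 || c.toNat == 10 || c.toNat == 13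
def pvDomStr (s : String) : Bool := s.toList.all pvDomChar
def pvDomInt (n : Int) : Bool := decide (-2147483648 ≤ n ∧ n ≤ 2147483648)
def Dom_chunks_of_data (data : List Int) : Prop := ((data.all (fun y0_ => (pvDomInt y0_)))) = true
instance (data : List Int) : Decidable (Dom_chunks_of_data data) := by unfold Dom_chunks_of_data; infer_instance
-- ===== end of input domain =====

-- B replaces A's right-to-left walk with a nested rescan by a single left-to-right
-- grouping pass (itertools.groupby) collecting run bounds, yielded in reverse;
-- both Pythons are generators, the equivalence is about the produced sequence.
-- (While loops are ported with a fuel parameter that is always sufficient.)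

-- ===== PORT A =====
-- inner while: 'while end >= 0 and start >= 0 and data[end] == data[start]: start -= 1'
-- fuel ≥ s + 1 makes the guard exact (the loop stops by its condition before fuel runs out)
def chunkStartA (data : List Int) (e : Int) : Nat → Int → Int
  | 0, s => s
  | fuel + 1, s =>
    if 0 ≤ e ∧ 0 ≤ s ∧ PySem.List.pyGet? data e = PySem.List.pyGet? data s then
      chunkStartA data e fuel (s - 1)
    else s

-- outer while over index; fuel ≥ index + 2 is always sufficient
def outerA (data : List Int) : Nat → Int → List (Int × Int)
  | 0, _ => []
  | fuel + 1, index =>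
    if 0 ≤ index then
      if PySem.List.pyGet? data index ≠ some (-1) then
        let start := chunkStartA data index (index + 1).toNat index
        (start + 1, index) :: outerA data fuel start
      else outerA data fuel (index - 1)
    else []

def chunks_of_data (data : List Int) : List (Int × Int) :=
  outerA data (data.length + 1) ((data.length : Int) - 1)

-- ===== PORT B =====
-- one step of itertools.groupby: length of the leading run of `v` and the rest
def takeRun (v : Int) (xs : List Int) : Nat × List Int :=
  match xs with
  | [] => (0, [])
  | x :: rest => if x = v then ((takeRun v rest).1 + 1, (takeRun v rest).2) else (0, x :: rest)

-- the 'for value, group in groupby(data)' loop collecting run bounds; fuel ≥ number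
-- of groups (≤ xs.length) is always sufficient
def collectRuns : Nat → Int → List Int → List (Int × Int)
  | 0, _, _ => []
  | fuel + 1, i, xs =>
    match xs with
    | [] => []
    | v :: rest =>
      let p := takeRun v rest
      let len : Int := (p.1 : Int) + 1
      (if v ≠ -1 then [(i, i + len - 1)] else []) ++ collectRuns fuel (i + len) p.2

def chunks_of_data_alt (data : List Int) : List (Int × Int) :=
  (collectRuns data.length 0 data).reverse

-- ===== PRECONDITION & SPEC =====
def Spec_chunks_of_data (data : List Int) (out : List (Int × Int)) : Prop := out = chunks_of_data_alt data
instance (data : List Int) (out : List (Int × Int)) : Decidable (Spec_chunks_of_data data out) := by unfold Spec_chunks_of_data; infer_instance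

-- ===== CLAIM (what is proved, stated in full; the proofs are below) =====
def Claim_equal_chunks_of_data : Prop := ∀ (data : List Int), Dom_chunks_of_data data → Spec_chunks_of_data data (chunks_of_data data)

-- ===== LEMMAS AND PROOFS =====

theorem takeRun_len (v : Int) (xs : List Int) :
    (takeRun v xs).1 + (takeRun v xs).2.length = xs.length := by
  induction xs with
  | nil => simp [takeRun]
  | cons x rest ih =>
    by_cases h : x = v
    · simp [takeRun, h]; omega
    · simp [takeRun, h]

theorem getLast?_cons_ne (a : Int) (l : List Int) (h : l ≠ []) :
    (a :: l).getLast? = l.getLast? := by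
  cases l with
  | nil => exact absurd rfl h
  | cons b t => exact List.getLast?_cons_cons ..

theorem getLast?_all (u : Int) (l : List Int) (h : ∀ x ∈ l, x = u) :
    (u :: l).getLast? = some u := by
  induction l generalizing u with
  | nil => rfl
  | cons b t ih =>
    rw [getLast?_cons_ne u (b :: t) (by simp)]
    have hb : b = u := h b (by simp)
    subst hb
    exact ih b (fun x hx => h x (by simp [hx]))

theorem collectRuns_nil (f : Nat) (j : Int) : collectRuns f j ([] : List Int) = [] := by
  cases f <;> rfl

theorem takeRun_snd_nil_all (v : Int) (xs : List Int) (h : (takeRun v xs).2 = []) :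
    ∀ x ∈ xs, x = v := by
  induction xs with
  | nil => simp
  | cons x rest ih =>
    by_cases hx : x = v
    · simp only [takeRun, if_pos hx] at h
      intro y hy
      rcases List.mem_cons.1 hy with rfl | hy
      · exact hx
      · exact ih h y hy
    · simp [takeRun, hx] at h

theorem takeRun_snd_getLast? (v : Int) (xs : List Int) (h : (takeRun v xs).2 ≠ []) :
    (takeRun v xs).2.getLast? = xs.getLast? := by
  induction xs with
  | nil => simp [takeRun] at h
  | cons x rest ih =>
    by_cases hx : x = v
    · simp only [takeRun, if_pos hx] at h ⊢
      have hrest : rest ≠ [] := by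
        intro hr; rw [hr] at h; simp [takeRun] at h
      rw [ih h, getLast?_cons_ne _ _ hrest]
    · simp [takeRun, hx]

theorem takeRun_append (v : Int) (xs ys : List Int)
    (h : (takeRun v xs).2 = [] → ys.head? ≠ some v) :
    takeRun v (xs ++ ys) = ((takeRun v xs).1, (takeRun v xs).2 ++ ys) := by
  induction xs with
  | nil =>
    simp only [takeRun, List.nil_append]
    cases ys with
    | nil => simp [takeRun]
    | cons y t =>
      have hy : y ≠ v := by
        intro hv; exact (h rfl) (by simp [hv])
      simp [takeRun, hy]
  | cons x rest ih =>
    by_cases hx : x = v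
    · simp only [takeRun, if_pos hx, List.cons_append] at h ⊢
      rw [ih h]
    · simp [takeRun, hx]

theorem takeRun_replicate (v : Int) (k : Nat) :
    takeRun v (List.replicate k v) = (k, []) := by
  induction k with
  | zero => simp [takeRun]
  | succ k ih => simp [List.replicate_succ, takeRun, ih]

-- with enough fuel the result does not depend on the exact fuel
theorem collectRuns_fuel (f1 : Nat) : ∀ (f2 : Nat) (xs : List Int) (i : Int),
    xs.length ≤ f1 → xs.length ≤ f2 → collectRuns f1 i xs = collectRuns f2 i xs := by
  induction f1 with
  | zero =>
    intro f2 xs i h1 _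
    have hnil : xs = [] := List.eq_nil_of_length_eq_zero (by omega)
    subst hnil
    rw [collectRuns_nil, collectRuns_nil]
  | succ f1 ih =>
    intro f2 xs i h1 h2
    cases xs with
    | nil => rw [collectRuns_nil, collectRuns_nil]
    | cons v rest =>
      cases f2 with
      | zero => simp at h2
      | succ f2 =>
        simp only [collectRuns]
        have hl := takeRun_len v rest
        congr 1
        exact ih f2 _ _ (by simp at h1; omega) (by simp at h2; omega)

theorem collectRuns_neg1_singleton (f : Nat) (i : Int) :
    collectRuns f i [(-1 : Int)] = [] := by
  cases f with
  | zero => rfl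
  | succ f => simp [collectRuns, takeRun, collectRuns_nil]

-- removing a trailing -1 does not change the collected runs
theorem collectRuns_append_neg1 (fuel : Nat) :
    ∀ (xs : List Int) (i : Int), xs.length < fuel →
      collectRuns fuel i (xs ++ [-1]) = collectRuns fuel i xs := by
  induction fuel with
  | zero =>
    intro xs i hxs
    exact absurd hxs (Nat.not_lt_zero _)
  | succ fuel ih =>
    intro xs i hxs
    cases xs with
    | nil => simp [collectRuns, takeRun, collectRuns_nil]
    | cons v rest =>
      by_cases hp : (takeRun v rest).2 = []
      · by_cases hv : v = -1
        · subst hv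
          have hall : ∀ x ∈ rest, x = (-1 : Int) := takeRun_snd_nil_all _ _ hp
          have hrep : rest = List.replicate rest.length (-1 : Int) :=
            List.eq_replicate_of_mem hall
          rw [List.cons_append]
          simp only [collectRuns]
          have h1 : takeRun (-1 : Int) (rest ++ [-1])
              = (rest.length + 1, ([] : List Int)) := by
            conv_lhs => rw [hrep]
            rw [show (List.replicate rest.length (-1 : Int)) ++ [-1]
                  = List.replicate (rest.length + 1) (-1 : Int) by
              rw [List.replicate_succ']]
            exact takeRun_replicate _ _
          rw [h1, hp]
          simp [collectRuns_nil]
        · have happ := takeRun_append v rest [-1]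
            (by intro _; simpa using fun hv' => hv hv'.symm)
          rw [List.cons_append]
          simp only [collectRuns]
          rw [happ, hp]
          dsimp only [List.nil_append]
          rw [collectRuns_neg1_singleton, collectRuns_nil]
      · have happ := takeRun_append v rest [-1] (by intro h'; exact absurd h' hp)
        have hlen : (takeRun v rest).2.length < fuel := by
          have := takeRun_len v rest
          simp at hxs; omega
        rw [List.cons_append]
        simp only [collectRuns]
        rw [happ]
        dsimp only
        rw [ih _ _ hlen]

-- appending a run of a fresh value v ≠ -1 appends exactly its bounds
theorem collectRuns_append_run (fuel : Nat) :
    ∀ (xs : List Int) (i : Int) (k : Nat) (v : Int),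
      v ≠ -1 → 1 ≤ k → xs.getLast? ≠ some v → xs.length < fuel →
      collectRuns fuel i (xs ++ List.replicate k v)
        = collectRuns fuel i xs ++ [(i + xs.length, i + xs.length + k - 1)] := by
  induction fuel with
  | zero =>
    intro xs i k v _ _ _ hxs
    exact absurd hxs (Nat.not_lt_zero _)
  | succ fuel ih =>
    intro xs i k v hv hk hlast hxs
    cases xs with
    | nil =>
      obtain ⟨k', rfl⟩ : ∃ k', k = k' + 1 := ⟨k - 1, by omega⟩
      simp [List.replicate_succ, collectRuns, takeRun_replicate, hv, collectRuns_nil]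
    | cons u rest =>
      by_cases hp : (takeRun u rest).2 = []
      · -- whole of u::rest is a run of u; its last element is u, so u ≠ v
        have hall : ∀ x ∈ rest, x = u := takeRun_snd_nil_all _ _ hp
        have hlastu : (u :: rest).getLast? = some u := getLast?_all u rest hall
        have huv : u ≠ v := by
          intro h; subst h; exact hlast hlastu
        have hhead : (List.replicate k v).head? ≠ some u := by
          obtain ⟨k', rfl⟩ : ∃ k', k = k' + 1 := ⟨k - 1, by omega⟩
          simp [List.replicate_succ]
          intro h; exact huv h.symm
        have happ := takeRun_append u rest (List.replicate k v) (fun _ => hhead)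
        have hrec := ih [] (i + ((takeRun u rest).1 + 1 : Int)) k v hv hk (by simp)
          (by simp at hxs ⊢; omega)
        simp only [List.nil_append, collectRuns_nil, List.length_nil, Nat.cast_zero,
          add_zero] at hrec
        have hp1 : (takeRun u rest).1 = rest.length := by
          have := takeRun_len u rest; rw [hp] at this; simpa using this
        rw [List.cons_append]
        simp only [collectRuns]
        rw [happ]
        dsimp only
        rw [hp]
        dsimp only [List.nil_append]
        rw [hrec, collectRuns_nil, List.append_nil, hp1,
          show ((u :: rest).length : Int) = (rest.length : Int) + 1 by
            push_cast [List.length_cons]; ring]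
      · have happ := takeRun_append u rest (List.replicate k v)
          (by intro h'; exact absurd h' hp)
        have hrest : rest ≠ [] := by
          intro h; rw [h] at hp; simp [takeRun] at hp
        have hlast2 : (takeRun u rest).2.getLast? ≠ some v := by
          rw [takeRun_snd_getLast? u rest hp]
          rwa [getLast?_cons_ne _ _ hrest] at hlast
        have hlen : (takeRun u rest).2.length < fuel := by
          have := takeRun_len u rest
          simp at hxs; omega
        have hlen2 := takeRun_len u rest
        rw [List.cons_append]
        simp only [collectRuns]
        rw [happ]
        dsimp only
        rw [ih _ _ k v hv hk hlast2 hlen, List.append_assoc]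
        congr 1
        congr 1
        simp only [List.cons.injEq, Prod.mk.injEq, and_true, List.length_cons]
        constructor <;> (push_cast; omega)

-- === A-side characterisation of the inner while loop ===

theorem chunkStartA_le (data : List Int) (e : Int) :
    ∀ (fuel : Nat) (s : Int), chunkStartA data e fuel s ≤ s := by
  intro fuel
  induction fuel with
  | zero => intro s; exact le_refl s
  | succ fuel ih =>
    intro s
    simp only [chunkStartA]
    split_ifs with h
    · have := ih (s - 1); omega
    · exact le_refl s

theorem chunkStartA_ge (data : List Int) (e : Int) :
    ∀ (fuel : Nat) (s : Int), -1 ≤ s → -1 ≤ chunkStartA data e fuel s := by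
  intro fuel
  induction fuel with
  | zero => intro s hs; exact hs
  | succ fuel ih =>
    intro s hs
    simp only [chunkStartA]
    split_ifs with h
    · exact ih (s - 1) (by omega)
    · exact hs

theorem chunkStartA_run (data : List Int) (e : Int) :
    ∀ (fuel : Nat) (s : Int), ∀ j : Int, chunkStartA data e fuel s < j → j ≤ s →
      PySem.List.pyGet? data j = PySem.List.pyGet? data e := by
  intro fuel
  induction fuel with
  | zero =>
    intro s j h1 h2
    simp only [chunkStartA] at h1
    exact absurd h2 (by omega)
  | succ fuel ih =>
    intro s j
    simp only [chunkStartA]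
    split_ifs with h
    · intro h1 h2
      by_cases hj : j = s
      · subst hj; exact h.2.2.symm
      · exact ih (s - 1) j h1 (by omega)
    · intro h1 h2
      exact absurd h2 (by omega)

theorem chunkStartA_stop (data : List Int) (e : Int) :
    ∀ (fuel : Nat) (s : Int), 0 ≤ e → s < (fuel : Int) →
      0 ≤ chunkStartA data e fuel s →
      PySem.List.pyGet? data (chunkStartA data e fuel s) ≠ PySem.List.pyGet? data e := by
  intro fuel
  induction fuel with
  | zero =>
    intro s _ hf hcs
    simp only [chunkStartA] at hcs
    exact absurd hcs (by omega)
  | succ fuel ih =>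
    intro s he hf
    simp only [chunkStartA]
    split_ifs with h
    · exact ih (s - 1) he (by push_cast at hf ⊢; omega)
    · intro hcs heq
      exact h ⟨he, hcs, heq.symm⟩

-- === the outer loop equals B's collected runs, reversed, on each prefix ===

theorem outerA_take (fuel : Nat) : ∀ (m : Nat) (data : List Int), m ≤ data.length → m < fuel →
    outerA data fuel ((m : Int) - 1) = (collectRuns m 0 (data.take m)).reverse := by
  induction fuel with
  | zero =>
    intro m data _ hf
    exact absurd hf (Nat.not_lt_zero _)
  | succ fuel ih =>
    intro m data hlen hf
    cases m with
    | zero =>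
      simp only [outerA]
      rw [if_neg (by omega)]
      simp [collectRuns_nil]
    | succ k =>
      have hcast : ((k + 1 : Nat) : Int) - 1 = (k : Int) := by push_cast; ring
      rw [hcast]
      have hk : k < data.length := by omega
      have hget : PySem.List.pyGet? data (k : Int) = some data[k] := by
        rw [PySem.List.pyGet?_natCast, List.getElem?_eq_getElem hk]
      by_cases hv : data[k] = -1
      · simp only [outerA]
        rw [if_pos (by omega), if_neg (by rw [hget, hv]; simp)]
        rw [ih k data (by omega) (by omega)]
        rw [List.take_succ, List.getElem?_eq_getElem hk, hv]
        simp only [Option.toList_some]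
        rw [collectRuns_append_neg1 (k + 1) _ _ (by simp only [List.length_take]; omega),
          collectRuns_fuel (k + 1) k _ _ (by simp only [List.length_take]; omega) (by simp only [List.length_take]; omega)]
      · -- the run case
        have hfk : ((k : Int) + 1).toNat = k + 1 := by omega
        have hs_le : chunkStartA data (k : Int) ((k : Int) + 1).toNat (k : Int)
            ≤ (k : Int) - 1 := by
          rw [hfk]
          simp only [chunkStartA]
          split_ifs with h
          · exact chunkStartA_le data (k : Int) k ((k : Int) - 1)
          · exact absurd ⟨by omega, by omega, by simp⟩ h
        have hs_ge : -1 ≤ chunkStartA data (k : Int) ((k : Int) + 1).toNat (k : Int) :=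
          chunkStartA_ge data (k : Int) _ (k : Int) (by omega)
        set s := chunkStartA data (k : Int) ((k : Int) + 1).toNat (k : Int) with hs_def
        set m' := (s + 1).toNat with hm'_def
        have hm'cast : (m' : Int) = s + 1 := Int.toNat_of_nonneg (by omega)
        have hm'k : m' ≤ k := by omega
        have hLHS : outerA data (fuel + 1) (k : Int) = (s + 1, (k : Int)) :: outerA data fuel s := by
          simp only [outerA]
          rw [if_pos (by omega), if_pos (by rw [hget]; simp [hv])]
        have hIH : outerA data fuel s = (collectRuns m' 0 (data.take m')).reverse := by
          rw [show s = ((m' : Nat) : Int) - 1 by omega]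
          exact ih m' data (by omega) (by omega)
        have hrun : ∀ (j : Nat), ∀ _hj1 : m' ≤ j, ∀ _hj2 : j ≤ k, data[j]'(by omega) = data[k] := by
          intro j h1 h2
          have h3 := chunkStartA_run data (k : Int) ((k : Int) + 1).toNat (k : Int) (j : Int)
            (by omega) (by exact_mod_cast h2)
          rw [hget, PySem.List.pyGet?_natCast, List.getElem?_eq_getElem (by omega : j < data.length)] at h3
          exact Option.some.inj h3
        have hdecomp : data.take (k + 1)
            = data.take m' ++ List.replicate (k + 1 - m') data[k] := by
          conv_lhs => rw [← List.take_append_drop m' (data.take (k + 1))]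
          congr 1
          · rw [List.take_take]; congr 1; omega
          · rw [List.eq_replicate_iff]
            constructor
            · simp; omega
            · intro b hb
              rw [List.mem_iff_getElem] at hb
              obtain ⟨t, ht, rfl⟩ := hb
              simp only [List.getElem_drop, List.getElem_take]
              have ht2 : m' + t ≤ k := by
                simp at ht; omega
              exact hrun (m' + t) (by omega) ht2
        have hlast : (data.take m').getLast? ≠ some data[k] := by
          cases hm0 : m' with
          | zero => simp
          | succ q =>
            have hs0 : 0 ≤ s := by omega
            have hstop := chunkStartA_stop data (k : Int) ((k : Int) + 1).toNat (k : Int)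
              (by omega) (by omega) hs0
            rw [hget] at hstop
            have hsq : s = ((q : Nat) : Int) := by omega
            rw [← hs_def, hsq, PySem.List.pyGet?_natCast,
              List.getElem?_eq_getElem (by omega : q < data.length)] at hstop
            have hq : (data.take (q + 1)).getLast? = some (data[q]'(by omega)) := by
              rw [show data.take (q + 1) = data.take q ++ [data[q]'(by omega)] by
                rw [List.take_succ,
                  List.getElem?_eq_getElem (by omega : q < data.length)]
                rfl]
              exact List.getLast?_concat
            rw [hq]
            intro hcontra
            exact hstop hcontra
        have hfin := collectRuns_append_run (k + 1) (data.take m') 0 (k + 1 - m') data[k]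
          hv (by omega) hlast (by simp only [List.length_take]; omega)
        rw [hLHS, hIH, hdecomp, hfin,
          collectRuns_fuel (k + 1) m' _ _ (by simp only [List.length_take]; omega) (by simp only [List.length_take]; omega),
          List.reverse_append, List.reverse_singleton, List.singleton_append]
        congr 2 <;> (simp only [List.length_take]; push_cast; omega)

-- ===== VERDICT (by name: the statement is the Claim_ definition above) =====
theorem chunks_of_data_spec : Claim_equal_chunks_of_data := by
  intro data _
  unfold Spec_chunks_of_data chunks_of_data chunks_of_data_alt
  have := outerA_take (data.length + 1) data.length data le_rfl (by omega)
  rwa [List.take_length] at this
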